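-- pv_equiv track=rewrite | github.com/quic/efficient-transformers | QEfficient/blocking/blocking_configurator.py | block_candidates_generator
-- ===== SOURCE A (Python) =====
-- from typing import Any, Dict, List, Optional, Tuple
--
-- def block_candidates_generator(max_length: int) -> List[int]:
--     block_list = []
--     i = 1
--     step = 1
--     while i <= max_length:
--         block_list.append(i)
--         if i % (4 * step) == 0:
--             step *= 2
--         i += step
--     return block_list
-- ===== SOURCE B (Python) =====
-- def block_candidates_generator(max_length: int):
--     # Direct generation: initial ramp 1..4, then pairs (3*p, 4*p) for p = 2, 4, 8, ...
--     out = [v for v in (1, 2, 3, 4) if v <= max_length]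
--     p = 2
--     while 3 * p <= max_length:
--         out.append(3 * p)
--         if 4 * p <= max_length:
--             out.append(4 * p)
--         p *= 2
--     return out
-- ===== Notes on version B (the rewrite author's own statement) =====
-- stated objective: simpler
-- what changed: B replaces A's step-doubling state machine (i, step with the i % (4*step) test) by direct generation: the ramp 1,2,3,4 followed by the pairs 3*p, 4*p for p = 2, 4, 8, ...
import Mathlib
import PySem

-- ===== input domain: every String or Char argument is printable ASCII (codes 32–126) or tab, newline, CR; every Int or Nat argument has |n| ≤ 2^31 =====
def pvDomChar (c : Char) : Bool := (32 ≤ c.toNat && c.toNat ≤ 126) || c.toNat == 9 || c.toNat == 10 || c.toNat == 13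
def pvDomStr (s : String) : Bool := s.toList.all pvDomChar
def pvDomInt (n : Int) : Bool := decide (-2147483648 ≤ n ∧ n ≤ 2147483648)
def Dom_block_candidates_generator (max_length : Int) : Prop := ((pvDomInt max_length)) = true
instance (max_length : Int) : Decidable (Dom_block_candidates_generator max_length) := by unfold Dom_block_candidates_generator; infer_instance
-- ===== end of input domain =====

-- B replaces A's step-doubling state machine by direct generation of the ramp 1..4 then pairs 3*p, 4*p (objective: simpler).

-- B replaces A's step-doubling state machine by direct generation of the ramp 1..4 then pairs 3*p, 4*p (objective: simpler).

-- ===== PORT A =====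
-- A's while loop, step for step; the Nat fuel ((max_length+1).toNat, enough for a loop that
-- increments i by at least 1 while i ≤ max_length) and the '0 < step' conjunct are totality
-- guards only — on every admitted input they never cut the computation short.
def pvAgoF : Nat → Int → Int → Int → List Int
  | 0, _, _, _ => []
  | fuel + 1, max_length, i, step =>
    if i ≤ max_length ∧ 0 < step then
      i :: pvAgoF fuel max_length
          (i + (if PySem.Int.mod i (4 * step) = 0 then step * 2 else step))
          (if PySem.Int.mod i (4 * step) = 0 then step * 2 else step)
    else []

def block_candidates_generator (max_length : Int) : List Int :=
  pvAgoF (max_length + 1).toNat max_length 1 1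

-- ===== PORT B =====
-- B's while loop over p = 2, 4, 8, ...; the '0 < p' conjunct is a totality guard only.
def pvBgo (max_length p : Int) : List Int :=
  if h : 0 < p ∧ 3 * p ≤ max_length then
    3 * p :: ((if 4 * p ≤ max_length then [4 * p] else []) ++ pvBgo max_length (p * 2))
  else []
termination_by (max_length + 1 - 3 * p).toNat
decreasing_by omega

def block_candidates_generator_alt (max_length : Int) : List Int :=
  ([1, 2, 3, 4].filter (fun v => v ≤ max_length)) ++ pvBgo max_length 2

-- ===== PRECONDITION & SPEC =====
def Spec_block_candidates_generator (max_length : Int) (out : List Int) : Prop := out = block_candidates_generator_alt max_length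
instance (max_length : Int) (out : List Int) : Decidable (Spec_block_candidates_generator max_length out) := by unfold Spec_block_candidates_generator; infer_instance

-- ===== CLAIM (what is proved, stated in full; the proofs are below) =====
def Claim_equal_block_candidates_generator : Prop := ∀ (max_length : Int), Dom_block_candidates_generator max_length → Spec_block_candidates_generator max_length (block_candidates_generator max_length)

-- ===== LEMMAS AND PROOFS =====

-- For 0 <= a < b, Python's a % b = a.
theorem pv_mod_self_lt (a b : Int) (h0 : 0 ≤ a) (h : a < b) : PySem.Int.mod a b = a := by
  have hb : 0 < b := lt_of_le_of_lt h0 h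
  rw [PySem.Int.mod_eq_emod_of_pos hb]
  exact Int.emod_eq_of_lt h0 h

theorem pv_mod_self (b : Int) (hb : 0 < b) : PySem.Int.mod b b = 0 := by
  rw [PySem.Int.mod_eq_emod_of_pos hb]
  simp

-- One iteration of A's loop with fuel left.
theorem pvAgoF_succ (f : Nat) (m i s : Int) (h : i ≤ m ∧ 0 < s) :
    pvAgoF (f + 1) m i s
      = i :: pvAgoF f m
          (i + (if PySem.Int.mod i (4 * s) = 0 then s * 2 else s))
          (if PySem.Int.mod i (4 * s) = 0 then s * 2 else s) := by
  rw [pvAgoF, if_pos h]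

-- A's loop stops once i exceeds max_length, whatever fuel is left.
theorem pvAgoF_nil (f : Nat) (m i s : Int) (h : m < i) : pvAgoF f m i s = [] := by
  cases f with
  | zero => rfl
  | succ f => rw [pvAgoF, if_neg (fun hg => absurd hg.1 (not_le.mpr h))]

-- B's loop stops when 3*p exceeds max_length (or p ≤ 0).
theorem pvBgo_nil (m p : Int) (h : ¬ (0 < p ∧ 3 * p ≤ m)) : pvBgo m p = [] := by
  rw [pvBgo]
  split_ifs with hg <;> first | rfl | exact absurd hg h

-- One iteration of B's loop.
theorem pvBgo_cons (m p : Int) (hp : 0 < p) (h3 : 3 * p ≤ m) :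
    pvBgo m p = 3 * p :: ((if 4 * p ≤ m then [4 * p] else []) ++ pvBgo m (p * 2)) := by
  rw [pvBgo, dif_pos (show 0 < p ∧ 3 * p ≤ m from ⟨hp, h3⟩)]

-- Core invariant: from state (i = 3*p, step = p), with fuel ≥ max_length+1-3*p, A's loop
-- produces exactly B's loop at p.
theorem pv_agreeF (m : Int) : ∀ (fuel : Nat) (p : Int), 0 < p →
    (m + 1 - 3 * p).toNat ≤ fuel → pvAgoF fuel m (3 * p) p = pvBgo m p := by
  intro fuel
  induction fuel using Nat.strong_induction_on with
  | _ fuel ih =>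
    intro p hp hfuel
    by_cases h3 : 3 * p ≤ m
    · cases fuel with
      | zero => exfalso; omega
      | succ f =>
        rw [pvAgoF_succ f m (3 * p) p ⟨h3, hp⟩,
           if_neg (show ¬ PySem.Int.mod (3 * p) (4 * p) = 0 by
             rw [pv_mod_self_lt (3 * p) (4 * p) (by omega) (by omega)]; omega)]
        rw [pvBgo_cons m p hp h3]
        congr 1
        rw [show 3 * p + p = 4 * p by ring]
        by_cases h4 : 4 * p ≤ m
        · cases f with
          | zero => exfalso; omega
          | succ f' =>
            rw [pvAgoF_succ f' m (4 * p) p ⟨h4, hp⟩, if_pos (pv_mod_self (4 * p) (by omega))]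
            rw [show 4 * p + p * 2 = 3 * (p * 2) by ring]
            rw [ih f' (by omega) (p * 2) (by omega) (by omega)]
            rw [if_pos h4, List.singleton_append]
        · rw [pvAgoF_nil f m (4 * p) p (by omega), if_neg h4, List.nil_append,
             pvBgo_nil m (p * 2) (by omega)]
    · rw [pvAgoF_nil fuel m (3 * p) p (by omega), pvBgo_nil m p (by omega)]

-- ===== VERDICT (by name: the statement is the Claim_ definition above) =====
theorem block_candidates_generator_spec : Claim_equal_block_candidates_generator := by
  intro m _
  show block_candidates_generator m = block_candidates_generator_alt m
  unfold block_candidates_generator block_candidates_generator_alt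
  by_cases h4 : (4 : Int) ≤ m
  · -- m ≥ 4 : A emits 1, 2, 3, 4 (doubling step at i = 4), then continues at (i, step) = (6, 2)
    obtain ⟨f, hf⟩ : ∃ f, (m + 1).toNat = (((f + 1) + 1) + 1) + 1 :=
      ⟨(m + 1).toNat - 4, by omega⟩
    rw [hf]
    rw [pvAgoF_succ _ m 1 1 ⟨by omega, by omega⟩,
       if_neg (show ¬ PySem.Int.mod 1 (4 * 1) = 0 by
         rw [show (4:Int) * 1 = 4 by norm_num, pv_mod_self_lt 1 4 (by norm_num) (by norm_num)]
         omega)]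
    rw [show (1:Int) + 1 = 2 by norm_num]
    rw [pvAgoF_succ _ m 2 1 ⟨by omega, by omega⟩,
       if_neg (show ¬ PySem.Int.mod 2 (4 * 1) = 0 by
         rw [show (4:Int) * 1 = 4 by norm_num, pv_mod_self_lt 2 4 (by norm_num) (by norm_num)]
         omega)]
    rw [show (2:Int) + 1 = 3 by norm_num]
    rw [pvAgoF_succ _ m 3 1 ⟨by omega, by omega⟩,
       if_neg (show ¬ PySem.Int.mod 3 (4 * 1) = 0 by
         rw [show (4:Int) * 1 = 4 by norm_num, pv_mod_self_lt 3 4 (by norm_num) (by norm_num)]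
         omega)]
    rw [show (3:Int) + 1 = 4 by norm_num]
    rw [pvAgoF_succ _ m 4 1 ⟨by omega, by omega⟩,
       if_pos (show PySem.Int.mod 4 (4 * 1) = 0 by
         rw [show (4:Int) * 1 = 4 by norm_num]; exact pv_mod_self 4 (by norm_num))]
    rw [show (4:Int) + 1 * 2 = 3 * 2 by norm_num, show (1:Int) * 2 = 2 by norm_num]
    rw [pv_agreeF m f 2 (by omega) (by omega)]
    have hflt : ([1, 2, 3, 4] : List Int).filter (fun v => v ≤ m) = [1, 2, 3, 4] := by
      rw [List.filter_eq_self]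
      intro a ha
      fin_cases ha <;> simp <;> omega
    rw [hflt]
    rfl
  · by_cases h1 : (1 : Int) ≤ m
    · -- 1 ≤ m ≤ 3 : three literal cases
      rw [pvBgo_nil m 2 (by omega)]
      interval_cases m <;> decide
    · -- m ≤ 0 : both sides are empty
      rw [pvAgoF_nil _ m 1 1 (by omega), pvBgo_nil m 2 (by omega)]
      rw [List.filter_eq_nil_iff.mpr, List.nil_append]
      intro a ha
      fin_cases ha <;> simp <;> omega
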